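-- pv_equiv track=rewrite | github.com/vnmrsharma/Ted | smart-vision-yolo-enhanced.py | _determine_scene_context
-- ===== SOURCE A (Python) =====
-- def _determine_scene_context(object_counts):
--     """Determine scene context"""
--     if 'person' in object_counts:
--         if any(obj in object_counts for obj in ['chair', 'couch', 'bed', 'dining table']):
--             return "indoor setting with furniture"
--         elif any(obj in object_counts for obj in ['car', 'bicycle', 'motorcycle']):
--             return "outdoor setting with vehicles"
--         else:
--             return "indoor or outdoor setting"
--     else:
--         if any(obj in object_counts for obj in ['chair', 'couch', 'tv', 'laptop']):
--             return "indoor room"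
--         elif any(obj in object_counts for obj in ['car', 'truck', 'bicycle']):
--             return "outdoor area with vehicles"
--         else:
--             return "general scene"
-- ===== SOURCE B (Python) =====
-- RANKS = {
--     'chair': (0, 0), 'couch': (0, 0), 'bed': (0, None), 'dining table': (0, None),
--     'tv': (None, 0), 'laptop': (None, 0),
--     'car': (1, 1), 'bicycle': (1, 1), 'motorcycle': (1, None), 'truck': (None, 1),
-- }
-- PERSON_LABELS = ("indoor setting with furniture", "outdoor setting with vehicles", "indoor or outdoor setting")
-- OTHER_LABELS = ("indoor room", "outdoor area with vehicles", "general scene")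
--
-- def _determine_scene_context(object_counts):
--     # single pass over the detected keys, keeping the minimum rule rank per branch
--     has_person = False
--     best_p = 2
--     best_o = 2
--     for key in object_counts:
--         if key == 'person':
--             has_person = True
--             continue
--         rp, ro = RANKS.get(key, (None, None))
--         if rp is not None and rp < best_p:
--             best_p = rp
--         if ro is not None and ro < best_o:
--             best_o = ro
--     return PERSON_LABELS[best_p] if has_person else OTHER_LABELS[best_o]
-- ===== Notes on version B (the rewrite author's own statement) =====
-- stated objective: alternative
-- what changed: Instead of A's nested if/elif chains that probe each keyword list for membership in the dict, B makes one pass over the detected keys, looking each key up in a keyword-to-rank table and keeping the minimum rule rank per branch (plus a person flag), then indexes a label table with the final rank.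
import Mathlib
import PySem

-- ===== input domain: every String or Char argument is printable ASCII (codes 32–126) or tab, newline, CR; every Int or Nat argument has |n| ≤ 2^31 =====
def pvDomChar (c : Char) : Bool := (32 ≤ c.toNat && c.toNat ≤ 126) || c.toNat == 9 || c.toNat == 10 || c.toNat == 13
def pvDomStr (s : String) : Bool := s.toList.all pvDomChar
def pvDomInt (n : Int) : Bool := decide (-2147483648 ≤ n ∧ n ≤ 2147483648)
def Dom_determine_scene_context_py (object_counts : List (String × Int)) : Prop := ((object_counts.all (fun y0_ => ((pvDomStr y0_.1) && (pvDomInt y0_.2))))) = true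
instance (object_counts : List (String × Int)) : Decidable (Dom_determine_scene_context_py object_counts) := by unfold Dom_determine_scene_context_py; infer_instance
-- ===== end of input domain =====

-- B replaces A's repeated keyword-membership probes by ONE pass over the dict's keys that keeps,
-- per branch, the minimum matching rule rank from a keyword→rank table; objective: alternative.


-- ===== PORT A =====
-- 'k in object_counts' on a Python dict: membership among the keys
def pvKeyIn (k : String) (d : List (String × Int)) : Bool := d.any (fun p => p.1 == k)

def determine_scene_context_py (object_counts : List (String × Int)) : String :=
  if pvKeyIn "person" object_counts then
    if ["chair", "couch", "bed", "dining table"].any (fun o => pvKeyIn o object_counts) then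
      "indoor setting with furniture"
    else if ["car", "bicycle", "motorcycle"].any (fun o => pvKeyIn o object_counts) then
      "outdoor setting with vehicles"
    else
      "indoor or outdoor setting"
  else
    if ["chair", "couch", "tv", "laptop"].any (fun o => pvKeyIn o object_counts) then
      "indoor room"
    else if ["car", "truck", "bicycle"].any (fun o => pvKeyIn o object_counts) then
      "outdoor area with vehicles"
    else
      "general scene"

-- ===== PORT B =====
-- RANKS: keyword → (rank in the person branch, rank in the no-person branch); none = no rule
def pvRanks : PySem.Dict String (Option Nat × Option Nat) :=
  PySem.Dict.ofList
    [("chair", (some 0, some 0)), ("couch", (some 0, some 0)), ("bed", (some 0, none)),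
     ("dining table", (some 0, none)), ("tv", (none, some 0)), ("laptop", (none, some 0)),
     ("car", (some 1, some 1)), ("bicycle", (some 1, some 1)), ("motorcycle", (some 1, none)),
     ("truck", (none, some 1))]

def pvPersonLabels : List String :=
  ["indoor setting with furniture", "outdoor setting with vehicles", "indoor or outdoor setting"]
def pvOtherLabels : List String :=
  ["indoor room", "outdoor area with vehicles", "general scene"]

-- one loop iteration of Source B: the person flag and the per-branch running minimum rank
def pvStep (st : Bool × Nat × Nat) (key : String) : Bool × Nat × Nat :=
  if key == "person" then (true, st.2.1, st.2.2)
  else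
    let r := pvRanks.getD key (none, none)
    let bp := match r.1 with | some w => if w < st.2.1 then w else st.2.1 | none => st.2.1
    let bo := match r.2 with | some w => if w < st.2.2 then w else st.2.2 | none => st.2.2
    (st.1, bp, bo)

def determine_scene_context_py_alt (object_counts : List (String × Int)) : String :=
  let st := object_counts.foldl (fun s p => pvStep s p.1) (false, 2, 2)
  -- the final index is always ≤ 2 < 3, so Python's LABELS[i] never raises and getD is exact here
  if st.1 then pvPersonLabels.getD st.2.1 "" else pvOtherLabels.getD st.2.2 ""

-- ===== PRECONDITION & SPEC =====
def Spec_determine_scene_context_py (object_counts : List (String × Int)) (out : String) : Prop := out = determine_scene_context_py_alt object_counts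
instance (object_counts : List (String × Int)) (out : String) : Decidable (Spec_determine_scene_context_py object_counts out) := by unfold Spec_determine_scene_context_py; infer_instance

-- ===== CLAIM (what is proved, stated in full; the proofs are below) =====
def Claim_equal_determine_scene_context_py : Prop := ∀ (object_counts : List (String × Int)), Dom_determine_scene_context_py object_counts → Spec_determine_scene_context_py object_counts (determine_scene_context_py object_counts)

-- ===== LEMMAS AND PROOFS =====
def furnP (k : String) : Bool := ["chair", "couch", "bed", "dining table"].any (fun o => k == o)
def vehP (k : String) : Bool := ["car", "bicycle", "motorcycle"].any (fun o => k == o)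
def furnO (k : String) : Bool := ["chair", "couch", "tv", "laptop"].any (fun o => k == o)
def vehO (k : String) : Bool := ["car", "truck", "bicycle"].any (fun o => k == o)

-- the rank of the first rule a key matches (2 = no rule), per branch
def rkP (k : String) : Nat := if furnP k then 0 else if vehP k then 1 else 2
def rkO (k : String) : Nat := if furnO k then 0 else if vehO k then 1 else 2

-- the branch answer as a minimum rank over the whole dict
def gRank (f v : String → Bool) (d : List (String × Int)) : Nat :=
  if d.any (fun x => f x.1) then 0 else if d.any (fun x => v x.1) then 1 else 2

lemma gRank_le (f v : String → Bool) (d : List (String × Int)) : gRank f v d ≤ 2 := by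
  unfold gRank; split_ifs <;> omega

lemma gRank_cons (f v : String → Bool) (k : String) (n : Int) (d : List (String × Int)) :
    gRank f v ((k, n) :: d) = min (if f k then 0 else if v k then 1 else 2) (gRank f v d) := by
  simp only [gRank, List.any_cons]
  by_cases h1 : f k <;> by_cases h2 : v k <;>
    by_cases h3 : d.any (fun x => f x.1) <;> by_cases h4 : d.any (fun x => v x.1) <;>
    simp [h1, h2, h3, h4]

lemma rank_char (k : String) :
    pvRanks.getD k (none, none) =
      ((if furnP k then some 0 else if vehP k then some 1 else none),
       (if furnO k then some 0 else if vehO k then some 1 else none)) := by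
  have hr : pvRanks = PySem.Dict.mk
    [("chair", (some 0, some 0)), ("couch", (some 0, some 0)), ("bed", (some 0, none)),
     ("dining table", (some 0, none)), ("tv", (none, some 0)), ("laptop", (none, some 0)),
     ("car", (some 1, some 1)), ("bicycle", (some 1, some 1)), ("motorcycle", (some 1, none)),
     ("truck", (none, some 1))] := by decide
  rw [hr]
  simp only [PySem.Dict.getD_eq_get?_getD, PySem.Dict.get?_mk_cons, furnP, vehP, furnO, vehO,
    List.any_cons, List.any_nil, Bool.or_false, beq_iff_eq]
  split_ifs <;> (try subst_vars) <;> simp_all <;> aesop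

lemma pvStep_eq (b : Bool) (p o : Nat) (hp : p ≤ 2) (ho : o ≤ 2) (k : String) :
    pvStep (b, p, o) k =
      if k = "person" then (true, p, o) else (b, min p (rkP k), min o (rkO k)) := by
  by_cases hk : k = "person"
  · simp [pvStep, hk]
  · simp only [pvStep, beq_iff_eq, if_neg hk, rank_char k, rkP, rkO]
    by_cases h1 : furnP k <;> by_cases h2 : vehP k <;>
      by_cases h3 : furnO k <;> by_cases h4 : vehO k <;>
      simp [h1, h2, h3, h4, Prod.ext_iff, Nat.min_def] <;> (try split_ifs) <;> omega

lemma fold_char (d : List (String × Int)) :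
    ∀ (b : Bool) (p o : Nat), p ≤ 2 → o ≤ 2 →
      d.foldl (fun s x => pvStep s x.1) (b, p, o) =
        (b || d.any (fun x => x.1 == "person"),
         min p (gRank furnP vehP d), min o (gRank furnO vehO d)) := by
  induction d with
  | nil => intro b p o hp ho; simp [gRank]; omega
  | cons x d ih =>
    rcases x with ⟨k, n⟩
    intro b p o hp ho
    simp only [List.foldl_cons, pvStep_eq b p o hp ho k]
    by_cases hk : k = "person"
    · rw [if_pos hk]
      rw [ih true p o hp ho]
      subst hk
      have h1 : furnP "person" = false := by decide
      have h2 : vehP "person" = false := by decide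
      have h3 : furnO "person" = false := by decide
      have h4 : vehO "person" = false := by decide
      simp [gRank_cons, h1, h2, h3, h4, List.any_cons]
      constructor <;> · have := gRank_le furnP vehP d; have := gRank_le furnO vehO d; omega
    · rw [if_neg hk]
      rw [ih b (min p (rkP k)) (min o (rkO k)) (by omega) (by omega)]
      refine Prod.ext ?_ (Prod.ext ?_ ?_)
      · have hb : (k == "person") = false := beq_eq_false_iff_ne.mpr hk
        simp [List.any_cons, hb]
      · simp only [gRank_cons, rkP]
        omega
      · simp only [gRank_cons, rkO]
        omega

lemma any_comm_key (ks : List String) (d : List (String × Int)) :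
    ks.any (fun o => pvKeyIn o d) = d.any (fun x => ks.any (fun o => x.1 == o)) := by
  rw [Bool.eq_iff_iff]
  simp only [List.any_eq_true, pvKeyIn]
  aesop

-- ===== VERDICT (by name: the statement is the Claim_ definition above) =====
theorem determine_scene_context_py_spec : Claim_equal_determine_scene_context_py := by
  intro d _
  unfold Spec_determine_scene_context_py determine_scene_context_py determine_scene_context_py_alt
  rw [fold_char d false 2 2 (by omega) (by omega)]
  simp only [Bool.false_or]
  rw [any_comm_key ["chair", "couch", "bed", "dining table"], any_comm_key ["car", "bicycle", "motorcycle"],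
    any_comm_key ["chair", "couch", "tv", "laptop"], any_comm_key ["car", "truck", "bicycle"]]
  have hfP : (fun (x : String × Int) => ["chair", "couch", "bed", "dining table"].any (fun o => x.1 == o)) = fun x => furnP x.1 := rfl
  have hvP : (fun (x : String × Int) => ["car", "bicycle", "motorcycle"].any (fun o => x.1 == o)) = fun x => vehP x.1 := rfl
  have hfO : (fun (x : String × Int) => ["chair", "couch", "tv", "laptop"].any (fun o => x.1 == o)) = fun x => furnO x.1 := rfl
  have hvO : (fun (x : String × Int) => ["car", "truck", "bicycle"].any (fun o => x.1 == o)) = fun x => vehO x.1 := rfl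
  rw [hfP, hvP, hfO, hvO]
  simp only [pvKeyIn]
  by_cases hp : d.any (fun x => x.1 == "person") <;>
    by_cases h1 : d.any (fun x => furnP x.1) <;> by_cases h2 : d.any (fun x => vehP x.1) <;>
    by_cases h3 : d.any (fun x => furnO x.1) <;> by_cases h4 : d.any (fun x => vehO x.1) <;>
    simp [gRank, hp, h1, h2, h3, h4, pvPersonLabels, pvOtherLabels]
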